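-- pv_equiv track=rewrite | github.com/jaredkirby/docgarden | docgarden/scan_alignment.py | _is_supported_review_prepare_args
-- ===== SOURCE A (Python) =====
-- def _is_supported_review_prepare_args(args: list[str]) -> bool:
--     index = 0
--     while index < len(args):
--         token = args[index]
--         if token.startswith("--domains="):
--             index += 1
--             continue
--         if token == "--domains":
--             if index + 1 >= len(args) or args[index + 1].startswith("-"):
--                 return False
--             index += 2
--             continue
--         return False
--     return True
-- ===== SOURCE B (Python) =====
-- def _is_supported_review_prepare_args(args: list[str]) -> bool:
--     expecting_value = False
--     for token in args:
--         if expecting_value: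
--             if token.startswith("-"):
--                 return False
--             expecting_value = False
--             continue
--         if token.startswith("--domains="):
--             continue
--         if token == "--domains":
--             expecting_value = True
--             continue
--         return False
--     return not expecting_value
-- ===== Notes on version B (the rewrite author's own statement) =====
-- stated objective: idiomatic
-- what changed: Replaced the index-based while loop with variable step (1 or 2, with look-ahead args[index+1]) by a single for-each pass carrying an expecting_value flag that defers the value check to the next iteration and rejects a trailing --domains after the loop.
import Mathlib
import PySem

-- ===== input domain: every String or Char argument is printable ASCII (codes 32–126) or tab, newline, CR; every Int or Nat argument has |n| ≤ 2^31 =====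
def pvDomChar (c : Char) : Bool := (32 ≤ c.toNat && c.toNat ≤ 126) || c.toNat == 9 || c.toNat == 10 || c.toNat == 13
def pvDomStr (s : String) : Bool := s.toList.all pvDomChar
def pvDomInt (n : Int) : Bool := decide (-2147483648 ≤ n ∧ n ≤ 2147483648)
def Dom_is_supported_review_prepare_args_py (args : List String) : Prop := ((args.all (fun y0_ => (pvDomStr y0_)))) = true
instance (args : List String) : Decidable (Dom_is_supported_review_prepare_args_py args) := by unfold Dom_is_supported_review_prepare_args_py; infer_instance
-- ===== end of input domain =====

-- ===== PORT A =====
-- B rewrites A's variable-step while loop as a for-each pass with an expecting_value flag (idiomatic decomposition).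
def pvGoA : List String → Bool
  | [] => true
  | t :: rest =>
    if PySem.Str.startswith t "--domains=" then pvGoA rest
    else if t == "--domains" then
      match rest with
      | [] => false
      | nxt :: rest' => if PySem.Str.startswith nxt "-" then false else pvGoA rest'
    else false

def is_supported_review_prepare_args_py (args : List String) : Bool := pvGoA args

-- ===== PORT B =====
def pvGoB : List String → Bool → Bool
  | [], expecting => !expecting
  | t :: rest, expecting =>
    if expecting then
      if PySem.Str.startswith t "-" then false else pvGoB rest false
    else if PySem.Str.startswith t "--domains=" then pvGoB rest false
    else if t == "--domains" then pvGoB rest true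
    else false

def is_supported_review_prepare_args_py_alt (args : List String) : Bool := pvGoB args false

-- ===== PRECONDITION & SPEC =====
def Spec_is_supported_review_prepare_args_py (args : List String) (out : Bool) : Prop := out = is_supported_review_prepare_args_py_alt args
instance (args : List String) (out : Bool) : Decidable (Spec_is_supported_review_prepare_args_py args out) := by unfold Spec_is_supported_review_prepare_args_py; infer_instance

-- ===== CLAIM (what is proved, stated in full; the proofs are below) =====
def Claim_equal_is_supported_review_prepare_args_py : Prop := ∀ (args : List String), Dom_is_supported_review_prepare_args_py args → Spec_is_supported_review_prepare_args_py args (is_supported_review_prepare_args_py args)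

-- ===== LEMMAS AND PROOFS =====

-- ===== VERDICT (by name: the statement is the Claim_ definition above) =====
theorem pvGoB_eq (l : List String) :
    pvGoB l false = pvGoA l ∧
    pvGoB l true = (match l with
      | [] => false
      | nxt :: rest' => if PySem.Str.startswith nxt "-" then false else pvGoA rest') := by
  induction l with
  | nil => exact ⟨rfl, rfl⟩
  | cons t rest ih =>
    refine ⟨?_, ?_⟩
    · show (if PySem.Str.startswith t "--domains=" then pvGoB rest false
        else if t == "--domains" then pvGoB rest true else false) = pvGoA (t :: rest)
      rw [ih.1, ih.2]
      cases rest <;> rfl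
    · show (if PySem.Str.startswith t "-" then false else pvGoB rest false) = _
      rw [ih.1]

theorem is_supported_review_prepare_args_py_spec : Claim_equal_is_supported_review_prepare_args_py := by
  intro args _
  show pvGoA args = pvGoB args false
  exact (pvGoB_eq args).1.symm
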